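-- pv_equiv track=rewrite | github.com/abhijay-py/othello | helper_files/helpers.py | get_datetime_from_log_file
-- ===== SOURCE A (Python) =====
-- def get_datetime_from_log_file(log_file):
--     underscore_count = 0
--     datetime_string = ''
--     for i in log_file:
--         if i == '_':
--             underscore_count += 1
--         elif underscore_count >= 4:
--             datetime_string += i
--     return datetime_string
-- ===== SOURCE B (Python) =====
-- def get_datetime_from_log_file(log_file):
--     return ''.join(log_file.split('_')[4:])
-- ===== Notes on version B (the rewrite author's own statement) =====
-- stated objective: idiomatic
-- what changed: Replaces the character-by-character scan with an underscore counter and growing accumulator by token parsing: split on '_', drop the first four tokens, join the rest.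
import Mathlib
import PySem

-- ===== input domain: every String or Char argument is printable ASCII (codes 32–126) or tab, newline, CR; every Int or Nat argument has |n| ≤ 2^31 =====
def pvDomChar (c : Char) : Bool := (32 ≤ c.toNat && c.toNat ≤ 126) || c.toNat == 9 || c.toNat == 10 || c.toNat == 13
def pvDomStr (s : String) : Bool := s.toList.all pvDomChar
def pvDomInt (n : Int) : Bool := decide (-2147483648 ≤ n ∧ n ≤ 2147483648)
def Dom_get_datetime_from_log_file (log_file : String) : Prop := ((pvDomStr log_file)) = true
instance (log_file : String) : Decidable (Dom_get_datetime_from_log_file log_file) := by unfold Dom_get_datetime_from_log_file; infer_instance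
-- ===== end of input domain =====

-- B replaces A's char-by-char counting loop by split-on-'_' / drop 4 tokens / join (idiomatic; same return value).

-- ===== PORT A =====
-- single for-loop over the characters, carrying (underscore_count, datetime_string)
def get_datetime_from_log_file (log_file : String) : String :=
  let st := log_file.toList.foldl
    (fun (st : Int × List Char) i =>
      if i = '_' then (st.1 + 1, st.2)
      else if 4 ≤ st.1 then (st.1, st.2 ++ [i])
      else st)
    ((0 : Int), ([] : List Char))
  String.ofList st.2

-- ===== PORT B =====
-- ''.join(log_file.split('_')[4:])
def get_datetime_from_log_file_alt (log_file : String) : String :=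
  let parts := PySem.Chars.splitOn log_file.toList ['_']
  String.ofList (PySem.Chars.join [] (parts.drop 4))

-- ===== PRECONDITION & SPEC =====
def Spec_get_datetime_from_log_file (log_file : String) (out : String) : Prop := out = get_datetime_from_log_file_alt log_file
instance (log_file : String) (out : String) : Decidable (Spec_get_datetime_from_log_file log_file out) := by unfold Spec_get_datetime_from_log_file; infer_instance

-- ===== CLAIM (what is proved, stated in full; the proofs are below) =====
def Claim_equal_get_datetime_from_log_file : Prop := ∀ (log_file : String), Dom_get_datetime_from_log_file log_file → Spec_get_datetime_from_log_file log_file (get_datetime_from_log_file log_file)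

-- ===== LEMMAS AND PROOFS =====

-- reference function: the characters after `n` more underscores, underscores removed
def pvCollect : List Char → Nat → List Char
  | [], _ => []
  | c :: t, n =>
    if c = '_' then pvCollect t (n - 1)
    else if n = 0 then c :: pvCollect t 0
    else pvCollect t n

-- simple recursive single-char split (reference for Chars.splitOn with sep = ['_'])
def pvSplit : List Char → List Char → List (List Char)
  | [], cur => [cur.reverse]
  | c :: t, cur => if c = '_' then cur.reverse :: pvSplit t [] else pvSplit t (c :: cur)

theorem pv_go_eq (l : List Char) : ∀ (fuel : Nat) (cur : List Char) (acc : List (List Char)),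
    l.length < fuel →
    PySem.Chars.splitOn.go ['_'] fuel l cur acc = acc.reverse ++ pvSplit l cur := by
  induction l with
  | nil =>
    intro fuel cur acc h
    match fuel, h with
    | fuel + 1, _ => simp [PySem.Chars.splitOn.go, pvSplit]
  | cons c t ih =>
    intro fuel cur acc h
    match fuel, h with
    | fuel + 1, h =>
      by_cases hc : c = '_'
      · subst hc
        have hp : (['_'] : List Char).isPrefixOf ('_' :: t) = true := by
          simp [List.isPrefixOf]
        rw [PySem.Chars.splitOn.go]
        simp only [hp, if_true, List.length, List.drop]
        rw [ih fuel [] (cur.reverse :: acc) (by simpa using Nat.lt_of_succ_lt_succ h)]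
        simp [pvSplit]
      · have hp : (['_'] : List Char).isPrefixOf (c :: t) = false := by
          simp [List.isPrefixOf]
          exact fun hh => (hc hh.symm).elim
        rw [PySem.Chars.splitOn.go]
        simp only [hp, Bool.false_eq_true, if_false]
        rw [ih fuel (c :: cur) acc (Nat.lt_of_succ_lt_succ h)]
        simp [pvSplit, hc]

theorem pv_splitOn_eq (l : List Char) :
    PySem.Chars.splitOn l ['_'] = pvSplit l [] := by
  unfold PySem.Chars.splitOn
  rw [pv_go_eq l (l.length + 1) [] [] (Nat.lt_succ_self _)]
  simp

theorem pv_intercalate_nil (l : List (List Char)) :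
    ([] : List Char).intercalate l = l.flatten := by
  induction l with
  | nil => simp [List.intercalate]
  | cons x t ih =>
    cases t with
    | nil => simp [List.intercalate]
    | cons y u =>
      simp only [List.intercalate] at *
      simp [List.intersperse] at *
      simpa using ih

theorem pv_flatten_drop (cs : List Char) : ∀ (cur : List Char) (n : Nat),
    ((pvSplit cs cur).drop n).flatten
      = (if n = 0 then cur.reverse else []) ++ pvCollect cs n := by
  induction cs with
  | nil =>
    intro cur n
    cases n <;> simp [pvSplit, pvCollect]
  | cons c t ih =>
    intro cur n
    by_cases hc : c = '_'
    · subst hc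
      simp only [pvSplit, if_true, pvCollect]
      cases n with
      | zero => simpa using ih [] 0
      | succ m => simpa using ih [] m
    · simp only [pvSplit, pvCollect, hc, if_false]
      rw [ih (c :: cur) n]
      cases n with
      | zero => simp
      | succ m => simp

theorem pv_foldl_eq (cs : List Char) : ∀ (k : Int) (acc : List Char),
    cs.foldl
      (fun (st : Int × List Char) i =>
        if i = '_' then (st.1 + 1, st.2)
        else if 4 ≤ st.1 then (st.1, st.2 ++ [i])
        else st)
      (k, acc)
      = ((cs.foldl (fun (st : Int × List Char) i =>
          if i = '_' then (st.1 + 1, st.2)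
          else if 4 ≤ st.1 then (st.1, st.2 ++ [i])
          else st) (k, acc)).1, acc ++ pvCollect cs ((4 - k).toNat)) := by
  induction cs with
  | nil => intro k acc; simp [pvCollect]
  | cons c t ih =>
    intro k acc
    by_cases hc : c = '_'
    · subst hc
      simp only [List.foldl_cons, if_true, pvCollect]
      rw [ih (k + 1) acc]
      have : (4 - (k + 1)).toNat = (4 - k).toNat - 1 := by omega
      simp [this]
    · by_cases hk : (4 : Int) ≤ k
      · have h0 : (4 - k).toNat = 0 := by omega
        simp only [List.foldl_cons, hc, if_false, hk, if_true]
        rw [ih k (acc ++ [c])]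
        simp [h0, pvCollect, hc]
      · have h0 : (4 - k).toNat ≠ 0 := by omega
        simp only [List.foldl_cons, hc, if_false, hk]
        rw [ih k acc]
        simp only [pvCollect, hc, if_false, h0]

-- ===== VERDICT (by name: the statement is the Claim_ definition above) =====
theorem get_datetime_from_log_file_spec : Claim_equal_get_datetime_from_log_file := by
  intro log_file _
  unfold Spec_get_datetime_from_log_file get_datetime_from_log_file get_datetime_from_log_file_alt
  simp only [pv_splitOn_eq, PySem.Chars.join, pv_intercalate_nil]
  rw [pv_foldl_eq log_file.toList 0 []]
  rw [pv_flatten_drop log_file.toList [] 4]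
  simp
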